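-- pv_equiv track=rewrite | github.com/DavidIfebueme/Lead-Finder-and-Pipedrive-Sync | app/routes.py | extract_api_keys
-- ===== SOURCE A (Python) =====
-- def extract_api_keys(settings):
--     """Extracts pipedrive_api_key and serp_api_key from settings array."""
--     pipedrive_api_key = None
--     serp_api_key = None
--
--     for item in settings:
--         if item.get("label") == "pipedrive_api_key":
--             pipedrive_api_key = item.get("default")
--         elif item.get("label") == "serp_api_key":
--             serp_api_key = item.get("default")
--
--     return pipedrive_api_key, serp_api_key
-- ===== SOURCE B (Python) =====
-- def extract_api_keys(settings):
--     """Extracts pipedrive_api_key and serp_api_key from settings array."""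
--     def last_default(label):
--         return next((item.get("default") for item in reversed(settings)
--                      if item.get("label") == label), None)
--     return last_default("pipedrive_api_key"), last_default("serp_api_key")
-- ===== Notes on version B (the rewrite author's own statement) =====
-- stated objective: alternative
-- what changed: Instead of one forward pass overwriting two accumulator variables, B does a staged backwards search per key: for each label it scans reversed(settings) and returns the first (i.e. last-in-order) matching item's default, stopping early at the match.
import Mathlib
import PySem

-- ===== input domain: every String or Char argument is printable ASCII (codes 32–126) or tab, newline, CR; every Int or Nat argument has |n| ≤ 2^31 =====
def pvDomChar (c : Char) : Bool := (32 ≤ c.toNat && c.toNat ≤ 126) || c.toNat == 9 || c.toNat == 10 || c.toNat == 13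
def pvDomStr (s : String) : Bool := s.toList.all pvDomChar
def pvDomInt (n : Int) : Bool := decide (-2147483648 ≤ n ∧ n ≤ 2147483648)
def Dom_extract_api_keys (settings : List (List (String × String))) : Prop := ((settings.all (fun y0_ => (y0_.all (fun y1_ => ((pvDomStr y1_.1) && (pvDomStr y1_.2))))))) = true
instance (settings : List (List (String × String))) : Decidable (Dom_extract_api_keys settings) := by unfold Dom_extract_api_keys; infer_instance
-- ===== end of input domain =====

-- B replaces A's single forward pass with two accumulators by a staged backwards search:
-- per label, scan reversed(settings) and return the first match's default (alternative, same cost).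

-- ===== PORT A =====
-- for item in settings: if label == "pipedrive_api_key": pipedrive = default; elif label == "serp_api_key": serp = default
def extract_api_keys (settings : List (List (String × String))) : Option String × Option String :=
  settings.foldl
    (fun st item =>
      let d := PySem.Dict.mk item
      if d.get? "label" = some "pipedrive_api_key" then (d.get? "default", st.2)
      else if d.get? "label" = some "serp_api_key" then (st.1, d.get? "default")
      else st)
    (none, none)

-- ===== PORT B =====
-- last_default(label) = next((item.get("default") for item in reversed(settings) if item.get("label") == label), None)
def pvLastDefault (settings : List (List (String × String))) (label : String) : Option String :=
  match settings.reverse.find? (fun item => (PySem.Dict.mk item).get? "label" == some label) with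
  | some item => (PySem.Dict.mk item).get? "default"
  | none => none

def extract_api_keys_alt (settings : List (List (String × String))) : Option String × Option String :=
  (pvLastDefault settings "pipedrive_api_key", pvLastDefault settings "serp_api_key")

-- ===== PRECONDITION & SPEC =====
def Spec_extract_api_keys (settings : List (List (String × String))) (out : Option String × Option String) : Prop := out = extract_api_keys_alt settings
instance (settings : List (List (String × String))) (out : Option String × Option String) : Decidable (Spec_extract_api_keys settings out) := by unfold Spec_extract_api_keys; infer_instance

-- ===== CLAIM =====
def Claim_equal_extract_api_keys : Prop := ∀ (settings : List (List (String × String))), Dom_extract_api_keys settings → Spec_extract_api_keys settings (extract_api_keys settings)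

-- ===== LEMMAS AND PROOFS =====

-- "first match in the reverse of l, else fallback x": B's search generalized with a fallback
def pvG (l : List (List (String × String))) (label : String) (x : Option String) : Option String :=
  match l.reverse.find? (fun item => (PySem.Dict.mk item).get? "label" == some label) with
  | some item => (PySem.Dict.mk item).get? "default"
  | none => x

theorem pvG_cons (item : List (String × String)) (rest : List (List (String × String)))
    (label : String) (x : Option String) :
    pvG (item :: rest) label x
      = pvG rest label
          (if (PySem.Dict.mk item).get? "label" = some label
           then (PySem.Dict.mk item).get? "default" else x) := by
  unfold pvG
  simp only [List.reverse_cons, List.find?_append]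
  cases h : rest.reverse.find? (fun it => (PySem.Dict.mk it).get? "label" == some label) with
  | some it => simp
  | none =>
    simp only [List.find?_singleton]
    by_cases hm : (PySem.Dict.mk item).get? "label" = some label
    · simp [hm]
    · simp [hm]

-- Loop invariant: A's running pair equals B's backwards searches with the pair as fallback.
theorem extract_api_keys_invariant (l : List (List (String × String)))
    (st : Option String × Option String) :
    l.foldl
      (fun st item =>
        let d := PySem.Dict.mk item
        if d.get? "label" = some "pipedrive_api_key" then (d.get? "default", st.2)
        else if d.get? "label" = some "serp_api_key" then (st.1, d.get? "default")
        else st) st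
    = (pvG l "pipedrive_api_key" st.1, pvG l "serp_api_key" st.2) := by
  induction l generalizing st with
  | nil => simp [pvG]
  | cons item rest ih =>
    simp only [List.foldl_cons, pvG_cons]
    by_cases hpk : (PySem.Dict.mk item).get? "label" = some "pipedrive_api_key"
    · have hsk : ¬ (PySem.Dict.mk item).get? "label" = some "serp_api_key" := by
        rw [hpk]; simp
      rw [if_pos hpk, ih, if_pos hpk, if_neg hsk]
    · rw [if_neg hpk, if_neg hpk]
      by_cases hsk : (PySem.Dict.mk item).get? "label" = some "serp_api_key"
      · rw [if_pos hsk, ih, if_pos hsk]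
      · rw [if_neg hsk, ih, if_neg hsk]

-- ===== VERDICT =====
theorem extract_api_keys_spec : Claim_equal_extract_api_keys := by
  intro settings _
  unfold Spec_extract_api_keys extract_api_keys extract_api_keys_alt
  rw [extract_api_keys_invariant]
  rfl
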